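-- pv_equiv track=rewrite | github.com/Midataur/JMSS-murder-board | main.py | default_sort
-- ===== SOURCE A (Python) =====
-- def default_sort(players):
--     living,dead = [],[]
--     for x in players:
--         if x[2] == 1:
--             living.append(x)
--         else:
--             dead.append(x)
--     living.sort(key=lambda x: x[1])
--     dead.sort(key=lambda x: x[1])
--     return living[::-1]+dead[::-1]
-- ===== SOURCE B (Python) =====
-- def default_sort(players):
--     # one descending stable sort of the reversed input, then a single partition pass
--     ordered = sorted(players[::-1], key=lambda x: x[1], reverse=True)
--     living, dead = [], []
--     for x in ordered:
--         (living if x[2] == 1 else dead).append(x)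
--     return living + dead
-- ===== Notes on version B (the rewrite author's own statement) =====
-- stated objective: alternative
-- what changed: B sorts once (descending, stable, on the reversed input) and then partitions in a single pass, instead of A's partition followed by two ascending sorts and two reversals.
import Mathlib
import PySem

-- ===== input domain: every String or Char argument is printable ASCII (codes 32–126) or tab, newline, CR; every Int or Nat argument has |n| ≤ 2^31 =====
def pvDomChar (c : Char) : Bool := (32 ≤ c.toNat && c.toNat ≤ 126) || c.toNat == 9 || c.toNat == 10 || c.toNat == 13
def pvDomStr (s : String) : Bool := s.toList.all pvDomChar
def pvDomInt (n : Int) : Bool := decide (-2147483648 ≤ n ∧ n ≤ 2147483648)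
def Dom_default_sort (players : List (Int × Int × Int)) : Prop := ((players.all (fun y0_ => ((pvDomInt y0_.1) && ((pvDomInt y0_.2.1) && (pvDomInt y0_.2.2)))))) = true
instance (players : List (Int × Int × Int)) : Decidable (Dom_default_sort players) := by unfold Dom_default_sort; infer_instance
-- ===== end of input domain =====

-- B replaces A's partition-then-two-sorts by one descending stable sort of the reversed input
-- followed by a single partition pass (alternative decomposition, same asymptotic cost).

-- ===== PORT A =====
def default_sort (players : List (Int × Int × Int)) : List (Int × Int × Int) :=
  -- for x in players: append to living / dead
  let p := players.foldl
    (fun (acc : List (Int × Int × Int) × List (Int × Int × Int)) x =>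
      if x.2.2 == 1 then (acc.1 ++ [x], acc.2) else (acc.1, acc.2 ++ [x])) ([], [])
  -- living.sort(key=lambda x: x[1]); dead.sort(key=lambda x: x[1])
  let living := PySem.List.sorted p.1 (fun x => x.2.1) false
  let dead := PySem.List.sorted p.2 (fun x => x.2.1) false
  -- living[::-1] + dead[::-1]
  ((PySem.List.slice? living none none (-1)).getD []) ++
    ((PySem.List.slice? dead none none (-1)).getD [])

-- ===== PORT B =====
def default_sort_alt (players : List (Int × Int × Int)) : List (Int × Int × Int) :=
  -- ordered = sorted(players[::-1], key=lambda x: x[1], reverse=True)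
  let ordered := PySem.List.sorted ((PySem.List.slice? players none none (-1)).getD [])
    (fun x => x.2.1) true
  -- single partition pass over ordered
  let p := ordered.foldl
    (fun (acc : List (Int × Int × Int) × List (Int × Int × Int)) x =>
      if x.2.2 == 1 then (acc.1 ++ [x], acc.2) else (acc.1, acc.2 ++ [x])) ([], [])
  p.1 ++ p.2

-- ===== PRECONDITION & SPEC =====
def Spec_default_sort (players : List (Int × Int × Int)) (out : List (Int × Int × Int)) : Prop := out = default_sort_alt players
instance (players : List (Int × Int × Int)) (out : List (Int × Int × Int)) : Decidable (Spec_default_sort players out) := by unfold Spec_default_sort; infer_instance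

-- ===== CLAIM (what is proved, stated in full; the proofs are below) =====
def Claim_equal_default_sort : Prop := ∀ (players : List (Int × Int × Int)), Dom_default_sort players → Spec_default_sort players (default_sort players)

-- ===== LEMMAS AND PROOFS =====

-- insertBy puts x first when it goes before every element
theorem insertBy_head {α : Type} (before : α → α → Bool) (x : α) (m : List α)
    (h : ∀ z ∈ m, before x z = true) :
    PySem.List.insertBy before x m = x :: m := by
  cases m with
  | nil => simp [PySem.List.insertBy]
  | cons z t => simp [PySem.List.insertBy, h z (by simp)]

-- insertBy commutes with appending a single element x goes before
theorem insertBy_append_singleton {α : Type} (before : α → α → Bool) (x y : α) (l : List α)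
    (h : before x y = true) :
    PySem.List.insertBy before x (l ++ [y]) = PySem.List.insertBy before x l ++ [y] := by
  induction l with
  | nil => simp [PySem.List.insertBy, h]
  | cons z t ih =>
    by_cases hz : before x z = true
    · simp [PySem.List.insertBy, hz]
    · simp only [Bool.not_eq_true] at hz
      simp [PySem.List.insertBy, hz, ih]

-- stable ascending insert (after ties) commutes with first-position insert (before ties)
theorem insertAsc_insertFirst_comm {α : Type} (key : α → Int) (x y : α) (l : List α) :
    PySem.List.insertBy (fun a b => decide (key a < key b)) y
      (PySem.List.insertBy (fun a b => decide (key a ≤ key b)) x l) =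
    PySem.List.insertBy (fun a b => decide (key a ≤ key b)) x
      (PySem.List.insertBy (fun a b => decide (key a < key b)) y l) := by
  induction l with
  | nil =>
    by_cases hxy : key y < key x
    · simp [PySem.List.insertBy, hxy, not_le.mpr hxy]
    · simp [PySem.List.insertBy, hxy, not_lt.mp hxy]
  | cons z t ih =>
    by_cases hx : key x ≤ key z <;> by_cases hy : key y < key z
    · by_cases hxy : key y < key x
      · simp [PySem.List.insertBy, hx, hy, hxy, not_le.mpr hxy]
      · simp [PySem.List.insertBy, hx, hy, hxy, not_lt.mp hxy]
    · have hxy : ¬ key y < key x := fun h => hy (lt_of_lt_of_le h hx)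
      simp [PySem.List.insertBy, hx, hy, hxy]
    · have hxy : ¬ key x ≤ key y := fun h => hx (le_of_lt (lt_of_le_of_lt h hy))
      simp [PySem.List.insertBy, hx, hy, hxy]
    · simp [PySem.List.insertBy, hx, hy, ih]

-- stable sort with a new head = first-position insert into the sorted tail
theorem sorted_cons_eq_insertFirst {α : Type} (key : α → Int) (x : α) (zs : List α) :
    PySem.List.sorted (x :: zs) key false =
    PySem.List.insertBy (fun a b => decide (key a ≤ key b)) x (PySem.List.sorted zs key false) := by
  induction zs using List.reverseRecOn with
  | nil => simp [PySem.List.sorted, PySem.List.insertBy]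
  | append_singleton zs y ih =>
    have h1 : x :: (zs ++ [y]) = (x :: zs) ++ [y] := by simp
    rw [h1, PySem.List.sorted_eq_foldl_insertBy, List.foldl_append,
      ← PySem.List.sorted_eq_foldl_insertBy, ih,
      PySem.List.sorted_eq_foldl_insertBy (zs ++ [y]), List.foldl_append,
      ← PySem.List.sorted_eq_foldl_insertBy]
    simp only [List.foldl_cons, List.foldl_nil]
    exact insertAsc_insertFirst_comm key x y _

-- descending stable insert = reverse ∘ first-position insert ∘ reverse, on a descending list
theorem insertDesc_eq_reverse_insertFirst {α : Type} (key : α → Int) (x : α) (w : List α)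
    (hw : w.Pairwise (fun a b => key b ≤ key a)) :
    PySem.List.insertBy (fun a b => decide (key b < key a)) x w =
    (PySem.List.insertBy (fun a b => decide (key a ≤ key b)) x w.reverse).reverse := by
  induction w with
  | nil => simp [PySem.List.insertBy]
  | cons y t ih =>
    rcases List.pairwise_cons.mp hw with ⟨hyt, ht⟩
    by_cases h : key y < key x
    · have hall : ∀ z ∈ t.reverse ++ [y], (fun a b => decide (key a ≤ key b)) x z = false := by
        intro z hz
        simp only [List.mem_append, List.mem_reverse, List.mem_singleton] at hz
        have : key z < key x := by
          rcases hz with hz | hz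
          · exact lt_of_le_of_lt (hyt z hz) h
          · subst hz; exact h
        simp [not_le.mpr this]
      simp only [List.reverse_cons]
      rw [PySem.List.insertBy_of_forall_not_before (fun a b => decide (key a ≤ key b)) x
        (t.reverse ++ [y]) hall]
      simp [PySem.List.insertBy, h]
    · have hle : key x ≤ key y := not_lt.mp h
      simp only [List.reverse_cons]
      rw [insertBy_append_singleton _ _ _ _ (by simp [hle])]
      simp [PySem.List.insertBy, h, ih ht]

-- Python: sorted(ys, key, reverse=True) = reversed(sorted(reversed(ys), key))
theorem sorted_rev_eq_reverse_sorted_reverse {α : Type} (key : α → Int) (ys : List α) :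
    PySem.List.sorted ys key true = (PySem.List.sorted ys.reverse key false).reverse := by
  induction ys using List.reverseRecOn with
  | nil => simp [PySem.List.sorted]
  | append_singleton ys x ih =>
    rw [PySem.List.sorted_rev_eq_foldl_insertBy, List.foldl_append,
      ← PySem.List.sorted_rev_eq_foldl_insertBy]
    simp only [List.foldl_cons, List.foldl_nil]
    rw [ih, insertDesc_eq_reverse_insertFirst key x _
      ((List.pairwise_reverse).mpr (by simpa using PySem.List.sorted_pairwise ys.reverse key)),
      List.reverse_reverse, ← sorted_cons_eq_insertFirst, List.reverse_append]
    simp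

-- filter commutes with stable ascending insert on a sorted list
theorem filter_insertAsc {α : Type} (key : α → Int) (p : α → Bool) (x : α) (l : List α)
    (hl : l.Pairwise (fun a b => key a ≤ key b)) :
    (PySem.List.insertBy (fun a b => decide (key a < key b)) x l).filter p =
    if p x then PySem.List.insertBy (fun a b => decide (key a < key b)) x (l.filter p)
    else l.filter p := by
  induction l with
  | nil => by_cases hp : p x <;> simp [PySem.List.insertBy, hp]
  | cons y ys ih =>
    rcases List.pairwise_cons.mp hl with ⟨hyys, hys⟩
    by_cases h : key x < key y
    · by_cases hp : p x
      · have hhead : PySem.List.insertBy (fun a b => decide (key a < key b)) x ((y :: ys).filter p)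
            = x :: (y :: ys).filter p := by
          apply insertBy_head
          intro z hz
          have hz' := List.mem_of_mem_filter hz
          rcases List.mem_cons.mp hz' with hz' | hz'
          · subst hz'; simp [h]
          · simp [lt_of_lt_of_le h (hyys z hz')]
        simp [PySem.List.insertBy, h, hp, hhead]
      · simp [PySem.List.insertBy, h, hp]
    · by_cases hpy : p y
      · by_cases hp : p x <;>
          simp [PySem.List.insertBy, h, hp, hpy, ih hys]
      · by_cases hp : p x <;>
          simp [PySem.List.insertBy, h, hp, hpy, ih hys]

-- filter commutes with the stable ascending sort
theorem filter_sorted {α : Type} (key : α → Int) (p : α → Bool) (xs : List α) :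
    (PySem.List.sorted xs key false).filter p = PySem.List.sorted (xs.filter p) key false := by
  induction xs using List.reverseRecOn with
  | nil => simp [PySem.List.sorted]
  | append_singleton xs x ih =>
    rw [PySem.List.sorted_eq_foldl_insertBy, List.foldl_append,
      ← PySem.List.sorted_eq_foldl_insertBy]
    simp only [List.foldl_cons, List.foldl_nil]
    rw [filter_insertAsc key p x _ (PySem.List.sorted_pairwise xs key), ih, List.filter_append]
    by_cases hp : p x
    · rw [PySem.List.sorted_eq_foldl_insertBy (xs.filter p ++ _), List.foldl_append,
        ← PySem.List.sorted_eq_foldl_insertBy]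
      simp [hp]
    · simp [hp]

-- the shared partition fold accumulates the two filters
theorem partition_foldl (xs : List (Int × Int × Int))
    (L D : List (Int × Int × Int)) :
    xs.foldl (fun (acc : List (Int × Int × Int) × List (Int × Int × Int)) x =>
      if x.2.2 == 1 then (acc.1 ++ [x], acc.2) else (acc.1, acc.2 ++ [x])) (L, D) =
    (L ++ xs.filter (fun x => x.2.2 == 1), D ++ xs.filter (fun x => !(x.2.2 == 1))) := by
  induction xs generalizing L D with
  | nil => simp
  | cons x t ih =>
    simp only [List.foldl_cons]
    by_cases h : (x.2.2 == 1) = true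
    · rw [if_pos h, ih]
      simp [h]
    · rw [if_neg h, ih]
      simp [h]

-- ===== VERDICT (by name: the statement is the Claim_ definition above) =====
theorem default_sort_spec : Claim_equal_default_sort := by
  intro players _
  unfold Spec_default_sort default_sort default_sort_alt
  simp only [PySem.List.slice?_none_none_neg_one, Option.getD_some]
  rw [partition_foldl, partition_foldl,
    sorted_rev_eq_reverse_sorted_reverse, List.reverse_reverse]
  simp only [List.nil_append]
  rw [List.filter_reverse, List.filter_reverse, filter_sorted, filter_sorted]
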